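-- pv_equiv track=rewrite | github.com/ArchiveHeritageGroup/heratio | docs/ops/km/build_functions_kb.py | normalise_mods
-- ===== SOURCE A (Python) =====
-- def normalise_mods(mods: str) -> str:
--     parts = mods.split()
--     seen = []
--     order = ['final', 'abstract', 'public', 'protected', 'private', 'static']
--     for o in order:
--         if o in parts:
--             seen.append(o)
--     return ' '.join(seen) if seen else 'public'
-- ===== SOURCE B (Python) =====
-- _RANK = {'final': 0, 'abstract': 1, 'public': 2, 'protected': 3,
--          'private': 4, 'static': 5}
--
--
-- def normalise_mods(mods: str) -> str:
--     kept = {t for t in mods.split() if t in _RANK}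
--     return ' '.join(sorted(kept, key=_RANK.__getitem__)) if kept else 'public'
-- ===== Notes on version B (the rewrite author's own statement) =====
-- stated objective: alternative
-- what changed: Replaces the scan over the fixed modifier list (membership test against the split tokens for each keyword) by a rank map: tokens are filtered against the map, deduplicated into a set, and sorted by rank.
import Mathlib
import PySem

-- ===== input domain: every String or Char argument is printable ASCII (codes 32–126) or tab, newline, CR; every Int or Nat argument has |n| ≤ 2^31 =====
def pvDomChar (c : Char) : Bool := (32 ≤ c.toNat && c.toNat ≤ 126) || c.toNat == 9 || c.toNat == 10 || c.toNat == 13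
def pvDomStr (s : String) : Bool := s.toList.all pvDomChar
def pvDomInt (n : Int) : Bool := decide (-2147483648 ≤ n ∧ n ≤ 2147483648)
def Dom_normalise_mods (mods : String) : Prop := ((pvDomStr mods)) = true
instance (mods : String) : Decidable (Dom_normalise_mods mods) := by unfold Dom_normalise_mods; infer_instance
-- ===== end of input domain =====

-- B replaces A's scan over the fixed modifier list by a rank map: filter the split
-- tokens against the map, deduplicate into a set, sort by rank (alternative decomposition).
-- ===== PORT A =====
def normalise_mods (mods : String) : String :=
  let parts := PySem.Str.split₀ mods
  let order : List String := ["final", "abstract", "public", "protected", "private", "static"]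
  let seen := order.foldl (fun seen o => if o ∈ parts then seen ++ [o] else seen) []
  if seen ≠ [] then PySem.Str.join " " seen else "public"

-- ===== PORT B =====
def modRank : PySem.Dict String Int :=
  PySem.Dict.mk [("final", 0), ("abstract", 1), ("public", 2), ("protected", 3), ("private", 4), ("static", 5)]

-- rank[t] is ported as getD with default 0: every sorted token passed the 'in rank'
-- filter, so the default is never used and the port is exact.
def normalise_mods_alt (mods : String) : String :=
  let kept : PySem.Set String :=
    PySem.Set.ofList ((PySem.Str.split₀ mods).filter (fun t => PySem.Dict.contains modRank t))
  if kept ≠ [] then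
    PySem.Str.join " " (PySem.List.sorted kept (fun t => PySem.Dict.getD modRank t 0) false)
  else "public"

-- ===== PRECONDITION & SPEC =====
def Spec_normalise_mods (mods : String) (out : String) : Prop := out = normalise_mods_alt mods
instance (mods : String) (out : String) : Decidable (Spec_normalise_mods mods out) := by unfold Spec_normalise_mods; infer_instance

-- ===== CLAIM (what is proved, stated in full; the proofs are below) =====
def Claim_equal_normalise_mods : Prop := ∀ (mods : String), Dom_normalise_mods mods → Spec_normalise_mods mods (normalise_mods mods)

-- ===== LEMMAS AND PROOFS =====

-- The list A computes: the keywords, in their fixed order, that occur in parts.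
def keptOrder (parts : List String) : List String :=
  (["final", "abstract", "public", "protected", "private", "static"] : List String).filter
    (fun o => decide (o ∈ parts))

theorem mem_order_iff_contains (x : String) :
    (x ∈ (["final", "abstract", "public", "protected", "private", "static"] : List String)) ↔
      PySem.Dict.contains modRank x = true := by
  simp [modRank, PySem.Dict.contains_mk]
  constructor
  · rintro (h | h | h | h | h | h) <;> simp [h]
  · rintro (h | h | h | h | h | h) <;> simp [h]

theorem keptOrder_perm (parts : List String) :
    (keptOrder parts).Perm
      (PySem.Set.ofList (parts.filter (fun t => PySem.Dict.contains modRank t))) := by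
  rw [List.perm_ext_iff_of_nodup]
  · intro a
    rw [PySem.Set.mem_ofList]
    simp only [keptOrder, List.mem_filter, decide_eq_true_eq]
    rw [and_comm, mem_order_iff_contains]
  · exact List.Nodup.filter _ (by decide)
  · exact PySem.Set.nodup_ofList _

theorem keptOrder_pairwise (parts : List String) :
    (keptOrder parts).Pairwise
      (fun a b => PySem.Dict.getD modRank a 0 < PySem.Dict.getD modRank b 0) := by
  refine List.Pairwise.filter _ ?_
  norm_num [modRank, PySem.Dict.getD, PySem.Dict.get?_mk_cons]
  decide

theorem sorted_kept_eq (parts : List String) :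
    PySem.List.sorted (PySem.Set.ofList (parts.filter (fun t => PySem.Dict.contains modRank t)))
      (fun t => PySem.Dict.getD modRank t 0) false = keptOrder parts := by
  apply PySem.List.sorted_eq_of_perm_of_pairwise_lt
  · exact keptOrder_perm parts
  · exact keptOrder_pairwise parts

theorem kept_nil_iff (parts : List String) :
    PySem.Set.ofList (parts.filter (fun t => PySem.Dict.contains modRank t)) = ([] : List String) ↔
      keptOrder parts = [] := by
  constructor <;> intro h
  · exact (h ▸ keptOrder_perm parts).eq_nil
  · exact (h ▸ (keptOrder_perm parts).symm).eq_nil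

-- ===== VERDICT (by name: the statement is the Claim_ definition above) =====
theorem normalise_mods_spec : Claim_equal_normalise_mods := by
  intro mods _
  unfold Spec_normalise_mods normalise_mods normalise_mods_alt
  simp only [PySem.List.foldl_append_ite_eq_filter, List.nil_append]
  rw [show (List.filter (fun o => decide (o ∈ PySem.Str.split₀ mods))
        (["final", "abstract", "public", "protected", "private", "static"] : List String)) =
      keptOrder (PySem.Str.split₀ mods) from rfl]
  rw [sorted_kept_eq]
  by_cases h : keptOrder (PySem.Str.split₀ mods) = []
  · rw [if_neg (not_not_intro h), if_neg (not_not_intro ((kept_nil_iff _).mpr h))]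
  · rw [if_pos h, if_pos (fun hc => h ((kept_nil_iff _).mp hc))]
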